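-- pv_equiv track=rewrite | github.com/dahea-moon/TIL-SSAFY | algorithm study/특이한 자석.py | turning
-- ===== SOURCE A (Python) =====
-- def turning(magnet, dir):
--     new = [0] * 8
--     if dir == 1:
--         for j in range(8):
--             if j == 7:
--                 new[0] = magnet[j]
--             else:
--                 new[j+1] = magnet[j]
--     else:
--         for j in range(8):
--             if j == 0:
--                 new[7] = magnet[j]
--             else:
--                 new[j-1] = magnet[j]
--     return new
-- ===== SOURCE B (Python) =====
-- def turning(magnet, dir):
--     # unpack the fixed 8-position ring and return the rotated arrangement directly
--     a, b, c, d, e, f, g, h = magnet[:8]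
--     if dir == 1:
--         return [h, a, b, c, d, e, f, g]
--     return [b, c, d, e, f, g, h, a]
-- ===== Notes on version B (the rewrite author's own statement) =====
-- stated objective: simpler
-- what changed: Replaces the element-by-element assignment loop with wraparound branches by unpacking the 8 ring positions once and returning the rotated arrangement as a literal list; no index loop, destination array or wraparound case is maintained.
import Mathlib
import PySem

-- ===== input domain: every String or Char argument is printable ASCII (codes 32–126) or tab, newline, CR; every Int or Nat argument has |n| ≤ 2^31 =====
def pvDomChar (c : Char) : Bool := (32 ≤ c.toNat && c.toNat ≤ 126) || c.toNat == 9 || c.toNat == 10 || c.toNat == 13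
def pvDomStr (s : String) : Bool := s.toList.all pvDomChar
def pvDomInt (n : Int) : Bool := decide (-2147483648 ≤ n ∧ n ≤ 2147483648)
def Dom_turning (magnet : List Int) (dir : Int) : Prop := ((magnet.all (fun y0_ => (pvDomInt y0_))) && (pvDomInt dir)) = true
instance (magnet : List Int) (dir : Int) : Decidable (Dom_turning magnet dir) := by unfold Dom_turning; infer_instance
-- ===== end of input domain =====

-- B unpacks the 8 ring positions and returns the rotated arrangement as a literal instead of A's branching assignment loop (simpler decomposition, same O(1) cost).


-- ===== PORT A =====
-- magnet[j] is ported with pyGet?/getD; the default branch is only reachable when Python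
-- raises IndexError (len < 8), which Pre_turning excludes.
def turning (magnet : List Int) (dir : Int) : List Int :=
  let new := List.replicate 8 (0 : Int)
  if dir = 1 then
    (List.range 8).foldl (fun (new : List Int) (j : Nat) =>
      if j = 7 then new.set 0 ((PySem.List.pyGet? magnet (j : Int)).getD 0)
      else new.set (j + 1) ((PySem.List.pyGet? magnet (j : Int)).getD 0)) new
  else
    (List.range 8).foldl (fun (new : List Int) (j : Nat) =>
      if j = 0 then new.set 7 ((PySem.List.pyGet? magnet (j : Int)).getD 0)
      else new.set (j - 1) ((PySem.List.pyGet? magnet (j : Int)).getD 0)) new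

-- ===== PORT B =====
-- a,b,c,d,e,f,g,h = magnet[:8]; the fallback branch is reachable only where the Python
-- unpacking raises ValueError (len < 8), which Pre_turning excludes.
def turning_alt (magnet : List Int) (dir : Int) : List Int :=
  match PySem.List.slice magnet none (some 8) with
  | [a, b, c, d, e, f, g, h] =>
      if dir = 1 then [h, a, b, c, d, e, f, g] else [b, c, d, e, f, g, h, a]
  | _ => []

-- ===== PRECONDITION & SPEC =====
-- Pre_ excludes exactly the lists shorter than 8, on which A raises IndexError.
def Pre_turning (magnet : List Int) (dir : Int) : Prop := 8 ≤ magnet.length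
instance (magnet : List Int) (dir : Int) : Decidable (Pre_turning magnet dir) := by unfold Pre_turning; infer_instance
def pvWitness_turning : List Int × Int := ([1, 2, 3, 4, 5, 6, 7, 8], 1)
def Spec_turning (magnet : List Int) (dir : Int) (out : List Int) : Prop := out = turning_alt magnet dir
instance (magnet : List Int) (dir : Int) (out : List Int) : Decidable (Spec_turning magnet dir out) := by unfold Spec_turning; infer_instance

-- ===== CLAIM (what is proved, stated in full; the proofs are below) =====
def Claim_equal_turning : Prop := ∀ (magnet : List Int) (dir : Int), Dom_turning magnet dir → Pre_turning magnet dir → Spec_turning magnet dir (turning magnet dir)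

-- ===== LEMMAS AND PROOFS =====
theorem turning_eq_alt (magnet : List Int) (dir : Int) (h : 8 ≤ magnet.length) :
    turning magnet dir = turning_alt magnet dir := by
  obtain ⟨a, b, c, d, e, f, g, h8, t, rfl⟩ :
      ∃ a b c d e f g h8 t, magnet = a :: b :: c :: d :: e :: f :: g :: h8 :: t := by
    match magnet, h with
    | a :: b :: c :: d :: e :: f :: g :: h8 :: t, _ =>
      exact ⟨a, b, c, d, e, f, g, h8, t, rfl⟩
  by_cases hd : dir = 1 <;>
    simp [turning, turning_alt, hd, List.range_succ,
      PySem.List.pyGet?_of_nonneg, PySem.List.slice]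

-- ===== VERDICT (by name: the statement is the Claim_ definition above) =====
theorem turning_spec : Claim_equal_turning := by
  intro magnet dir _ hpre
  exact turning_eq_alt magnet dir hpre
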